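-- pv_equiv track=rewrite | github.com/Stepanova-Anna/Programming-2 | ЛР 4/T3.py | two_sum_hashed_all
-- ===== SOURCE A (Python) =====
-- def two_sum_hashed_all(lst, target):
--     """ Возвращает список всех наборов индексов, сумма которых равна target с использованием хеш-таблицы. """
--     num_to_indices = {}
--     result = []
--
--     for i, num in enumerate(lst):
--         if num in num_to_indices:
--             num_to_indices[num].append(i)
--         else:
--             num_to_indices[num] = [i]
--
--     seen_pairs = set()
--
--     for i, num in enumerate(lst):
--         complement = target - num
--         if complement in num_to_indices:
--             for j in num_to_indices[complement]:
--                 if i < j and (i, j) not in seen_pairs: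
--                     result.append((i, j))
--                     seen_pairs.add((i, j))
--
--     return result
-- ===== SOURCE B (Python) =====
-- def two_sum_hashed_all(lst, target):
--     """ Возвращает список всех наборов индексов, сумма которых равна target (перебор пар). """
--     result = []
--     for i, x in enumerate(lst):
--         for j, y in enumerate(lst):
--             if i < j and x + y == target:
--                 result.append((i, j))
--     return result
-- ===== Notes on version B (the rewrite author's own statement) =====
-- stated objective: simpler
-- what changed: Replaced the hash-table of value->index-lists, the complement lookup and the seen-pairs set with a plain brute-force double loop over index pairs, keeping only the result list; the (i ascending, j ascending) emission order is preserved.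
import Mathlib
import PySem

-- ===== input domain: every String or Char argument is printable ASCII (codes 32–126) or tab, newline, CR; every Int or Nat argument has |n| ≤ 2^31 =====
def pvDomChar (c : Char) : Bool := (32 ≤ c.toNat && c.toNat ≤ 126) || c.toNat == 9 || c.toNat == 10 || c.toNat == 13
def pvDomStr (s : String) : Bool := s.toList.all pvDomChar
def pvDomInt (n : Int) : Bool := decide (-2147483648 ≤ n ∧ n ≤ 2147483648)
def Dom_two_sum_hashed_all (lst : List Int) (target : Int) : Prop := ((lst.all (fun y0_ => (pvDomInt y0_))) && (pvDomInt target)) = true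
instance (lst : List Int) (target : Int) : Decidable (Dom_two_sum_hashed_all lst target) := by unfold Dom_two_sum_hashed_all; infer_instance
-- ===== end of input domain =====

-- B replaces A's hash-table + complement scan + seen-pairs set by a brute-force double loop
-- over index pairs (simpler; same output order).


-- ===== PORT A =====
-- first loop of A: build num_to_indices
def two_sum_buildIdx (lst : List Int) : PySem.Dict Int (List Int) :=
  (PySem.List.enumerate lst).foldl
    (fun d p =>
      if d.contains p.2 then d.modify p.2 [] (fun js => js ++ [p.1])
      else d.insert p.2 [p.1])
    PySem.Dict.empty

-- inner 'for j in num_to_indices[complement]' loop of A; state = (result, seen_pairs)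
def two_sum_innerA (i : Int) (st : List (Int × Int) × PySem.Set (Int × Int)) (js : List Int) :
    List (Int × Int) × PySem.Set (Int × Int) :=
  js.foldl
    (fun st j =>
      if i < j ∧ PySem.Set.contains st.2 (i, j) = false then
        (st.1 ++ [(i, j)], PySem.Set.add st.2 (i, j))
      else st)
    st

def two_sum_hashed_all (lst : List Int) (target : Int) : List (Int × Int) :=
  let num_to_indices := two_sum_buildIdx lst
  ((PySem.List.enumerate lst).foldl
    (fun st p =>
      let complement := target - p.2
      if num_to_indices.contains complement then
        two_sum_innerA p.1 st (num_to_indices.getD complement [])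
      else st)
    ([], PySem.Set.empty)).1

-- ===== PORT B =====
def two_sum_hashed_all_alt (lst : List Int) (target : Int) : List (Int × Int) :=
  (PySem.List.enumerate lst).foldl
    (fun result p =>
      (PySem.List.enumerate lst).foldl
        (fun result q =>
          if decide (p.1 < q.1) && (p.2 + q.2 == target) then result ++ [(p.1, q.1)]
          else result)
        result)
    []

-- ===== PRECONDITION & SPEC =====
def Spec_two_sum_hashed_all (lst : List Int) (target : Int) (out : List (Int × Int)) : Prop := out = two_sum_hashed_all_alt lst target
instance (lst : List Int) (target : Int) (out : List (Int × Int)) : Decidable (Spec_two_sum_hashed_all lst target out) := by unfold Spec_two_sum_hashed_all; infer_instance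

-- ===== CLAIM (what is proved, stated in full; the proofs are below) =====
def Claim_equal_two_sum_hashed_all : Prop := ∀ (lst : List Int) (target : Int), Dom_two_sum_hashed_all lst target → Spec_two_sum_hashed_all lst target (two_sum_hashed_all lst target)

-- ===== LEMMAS AND PROOFS =====

-- A's dictionary maps each value v to the ascending list of indices holding v
theorem buildIdx_getD (lst : List Int) (v : Int) :
    (two_sum_buildIdx lst).getD v [] =
      ((PySem.List.enumerate lst).filter (fun p => p.2 == v)).map (·.1) := by
  unfold two_sum_buildIdx
  have hstep :
      (fun (d : PySem.Dict Int (List Int)) (p : Int × Int) =>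
          if d.contains p.2 then d.modify p.2 [] (fun js => js ++ [p.1])
          else d.insert p.2 [p.1])
        = fun d p => d.modify p.2 [] (fun js => js ++ [p.1]) := by
    funext d p
    by_cases h : d.contains p.2
    · simp [h]
    · simp only [h, PySem.Dict.modify,
        PySem.Dict.getD_of_not_contains _ _ (by simpa using h)]
      rfl
  rw [hstep]
  have hmap :
      (PySem.List.enumerate lst).foldl
          (fun d p => d.modify p.2 [] (fun js => js ++ [p.1])) PySem.Dict.empty
        = ((PySem.List.enumerate lst).map (fun p => (p.2, p.1))).foldl
            (fun d q => d.modify q.1 [] (fun js => js ++ [q.2])) PySem.Dict.empty := by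
    rw [List.foldl_map]
  rw [hmap, PySem.Dict.getD_foldl_modify_append]
  simp [List.filter_map, List.map_map, Function.comp_def]

-- the index lists in A's dictionary have no duplicates
theorem buildIdx_nodup (lst : List Int) (v : Int) :
    ((two_sum_buildIdx lst).getD v []).Nodup := by
  rw [buildIdx_getD]
  have h1 : ((PySem.List.enumerate lst).filter (fun p => p.2 == v)).Pairwise
      (fun p q => p.1 < q.1) := (PySem.List.pairwise_lt_enumerate lst 0).filter _
  have h2 := h1.map (f := (·.1)) (S := (· < ·)) (by intro a b h; exact h)
  exact h2.imp (fun h => Int.ne_of_lt h)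

-- the seen-pairs check never fires: the inner loop appends exactly the filtered pairs
theorem innerA_spec (i : Int) (js : List Int) (st : List (Int × Int) × PySem.Set (Int × Int))
    (hnd : js.Nodup)
    (hseen : ∀ q ∈ st.2, q.1 < i ∨ (q.1 = i ∧ q.2 ∉ js)) :
    (two_sum_innerA i st js).1
        = st.1 ++ (js.filter (fun j => decide (i < j))).map (fun j => (i, j)) ∧
    ∀ q ∈ (two_sum_innerA i st js).2, q ∈ st.2 ∨ q.1 = i := by
  induction js generalizing st with
  | nil =>
    refine ⟨by simp [two_sum_innerA], fun q hq => Or.inl ?_⟩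
    simpa [two_sum_innerA] using hq
  | cons j tl ih =>
    have hndtl : tl.Nodup := hnd.of_cons
    by_cases hij : i < j
    · have hnotin : (i, j) ∉ st.2 := by
        intro hmem
        rcases hseen _ hmem with h | ⟨_, h2⟩
        · exact absurd h (lt_irrefl i)
        · exact h2 (List.mem_cons_self)
      have hstep : two_sum_innerA i st (j :: tl)
          = two_sum_innerA i (st.1 ++ [(i, j)], PySem.Set.add st.2 (i, j)) tl := by
        simp [two_sum_innerA, hij, hnotin]
      rw [hstep]
      have hseen' : ∀ q ∈ (st.1 ++ [(i, j)], PySem.Set.add st.2 (i, j)).2,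
          q.1 < i ∨ (q.1 = i ∧ q.2 ∉ tl) := by
        intro q hq
        rcases (PySem.Set.mem_add st.2 (i, j) q).1 hq with hq' | hq'
        · rcases hseen _ hq' with h | ⟨h1, h2⟩
          · exact Or.inl h
          · exact Or.inr ⟨h1, fun hc => h2 (List.mem_cons_of_mem _ hc)⟩
        · subst hq'
          exact Or.inr ⟨rfl, (List.nodup_cons.1 hnd).1⟩
      obtain ⟨h1, h2⟩ := ih _ hndtl hseen'
      refine ⟨?_, ?_⟩
      · rw [h1]; simp [hij]
      · intro q hq
        rcases h2 q hq with hq' | hq'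
        · rcases (PySem.Set.mem_add st.2 (i, j) q).1 hq' with h | h
          · exact Or.inl h
          · subst h; exact Or.inr rfl
        · exact Or.inr hq'
    · have hstep : two_sum_innerA i st (j :: tl) = two_sum_innerA i st tl := by
        simp [two_sum_innerA, hij]
      rw [hstep]
      have hseen' : ∀ q ∈ st.2, q.1 < i ∨ (q.1 = i ∧ q.2 ∉ tl) := by
        intro q hq
        rcases hseen _ hq with h | ⟨h1, h2⟩
        · exact Or.inl h
        · exact Or.inr ⟨h1, fun hc => h2 (List.mem_cons_of_mem _ hc)⟩
      obtain ⟨h1, h2⟩ := ih _ hndtl hseen'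
      exact ⟨by rw [h1]; simp [hij], h2⟩

-- A's outer loop accumulates, for each i in order, the filtered complement-index block
theorem outerA_spec (lst : List Int) (target : Int) (l : List Int) (s : Int)
    (st : List (Int × Int) × PySem.Set (Int × Int))
    (hseen : ∀ q ∈ st.2, q.1 < s) :
    ((PySem.List.enumerate l s).foldl
        (fun st p =>
          let complement := target - p.2
          if (two_sum_buildIdx lst).contains complement then
            two_sum_innerA p.1 st ((two_sum_buildIdx lst).getD complement [])
          else st)
        st).1
      = st.1 ++ (PySem.List.enumerate l s).flatMap
          (fun p => (((two_sum_buildIdx lst).getD (target - p.2) []).filter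
              (fun j => decide (p.1 < j))).map (fun j => (p.1, j))) := by
  induction l generalizing s st with
  | nil => simp [PySem.List.enumerate]
  | cons x tl ih =>
    rw [PySem.List.enumerate_cons]
    simp only [List.foldl_cons, List.flatMap_cons]
    have hstep :
        (let complement := target - (s, x).2
         if (two_sum_buildIdx lst).contains complement then
           two_sum_innerA (s, x).1 st ((two_sum_buildIdx lst).getD complement [])
         else st)
          = two_sum_innerA s st ((two_sum_buildIdx lst).getD (target - x) []) := by
      by_cases hc : (two_sum_buildIdx lst).contains (target - x)
      · simp [hc]
      · simp only [hc, Bool.false_eq_true, if_false]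
        rw [PySem.Dict.getD_of_not_contains _ _ (by simpa using hc)]
        simp [two_sum_innerA]
    rw [hstep]
    obtain ⟨h1, h2⟩ := innerA_spec s ((two_sum_buildIdx lst).getD (target - x) []) st
      (buildIdx_nodup lst (target - x))
      (fun q hq => Or.inl (hseen q hq))
    have hseen' : ∀ q ∈ (two_sum_innerA s st ((two_sum_buildIdx lst).getD (target - x) [])).2,
        q.1 < s + 1 := by
      intro q hq
      rcases h2 q hq with h | h
      · exact lt_trans (hseen q h) (by omega)
      · omega
    rw [ih (s + 1) _ hseen', h1, List.append_assoc]

-- per-index block equality: A's complement-list block is B's scan block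
theorem block_eq (lst : List Int) (target : Int) (p : Int × Int) :
    (((two_sum_buildIdx lst).getD (target - p.2) []).filter
        (fun j => decide (p.1 < j))).map (fun j => (p.1, j))
      = ((PySem.List.enumerate lst).filter
          (fun q => decide (p.1 < q.1) && (p.2 + q.2 == target))).map (fun q => (p.1, q.1)) := by
  rw [buildIdx_getD, List.filter_map, List.map_map]
  rw [List.filter_filter]
  congr 1
  apply List.filter_congr
  intro q _
  have h1 : (q.2 == target - p.2) = (p.2 + q.2 == target) := by
    rw [Bool.eq_iff_iff]
    simp only [beq_iff_eq]
    omega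
  simp only [Function.comp_def, h1, Bool.and_comm]

-- B's nested fold is the flatMap of per-index blocks
theorem altB_spec (lst : List Int) (target : Int) :
    two_sum_hashed_all_alt lst target
      = (PySem.List.enumerate lst).flatMap
          (fun p => ((PySem.List.enumerate lst).filter
              (fun q => decide (p.1 < q.1) && (p.2 + q.2 == target))).map (fun q => (p.1, q.1))) := by
  unfold two_sum_hashed_all_alt
  have hstep :
      (fun (result : List (Int × Int)) (p : Int × Int) =>
          (PySem.List.enumerate lst).foldl
            (fun result q =>
              if decide (p.1 < q.1) && (p.2 + q.2 == target) then result ++ [(p.1, q.1)]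
              else result)
            result)
        = fun result p => result ++ ((PySem.List.enumerate lst).filter
            (fun q => decide (p.1 < q.1) && (p.2 + q.2 == target))).map (fun q => (p.1, q.1)) := by
    funext result p
    exact PySem.List.foldl_append_if _ _ _ _
  rw [hstep, PySem.List.foldl_append_eq_flatMap]
  simp

-- ===== VERDICT (by name: the statement is the Claim_ definition above) =====
theorem two_sum_hashed_all_spec : Claim_equal_two_sum_hashed_all := by
  intro lst target _
  unfold Spec_two_sum_hashed_all two_sum_hashed_all
  rw [outerA_spec lst target lst 0 ([], PySem.Set.empty) (by intro q hq; simp [PySem.Set.empty] at hq)]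
  rw [altB_spec]
  show ([] : List (Int × Int)) ++ _ = _
  rw [List.nil_append]
  congr 1
  funext p
  exact block_eq lst target p
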